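-- pv_equiv track=rewrite | github.com/VictorHSMoura/CC-UFMG | IR/crawler.py | isBlockedURLS
-- ===== SOURCE A (Python) =====
-- def isBlockedURLS(url: str):
--     blocked_parts = ["strava.app.link", "booked", "nochi", "hotelmix", "javascript:"]
--     blocked_ends = [".htm", ".onion", ".pdf"]
--
--     for part in blocked_parts:
--         if part in url: return True
--
--     for end in blocked_ends:
--         if end in url: return True
--
--     return False
-- ===== SOURCE B (Python) =====
-- def isBlockedURLS(url: str):
--     patterns = ["strava.app.link", "booked", "nochi", "hotelmix", "javascript:",
--                 ".htm", ".onion", ".pdf"]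
--     for i in range(len(url) + 1):
--         for p in patterns:
--             if url.startswith(p, i):
--                 return True
--     return False
-- ===== Notes on version B (the rewrite author's own statement) =====
-- stated objective: alternative
-- what changed: Instead of running an independent substring-membership scan for each blocked pattern over two lists, B makes a single left-to-right pass over the URL positions and checks at each position whether any blocked pattern starts there (a naive multi-pattern matcher).
import Mathlib
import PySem

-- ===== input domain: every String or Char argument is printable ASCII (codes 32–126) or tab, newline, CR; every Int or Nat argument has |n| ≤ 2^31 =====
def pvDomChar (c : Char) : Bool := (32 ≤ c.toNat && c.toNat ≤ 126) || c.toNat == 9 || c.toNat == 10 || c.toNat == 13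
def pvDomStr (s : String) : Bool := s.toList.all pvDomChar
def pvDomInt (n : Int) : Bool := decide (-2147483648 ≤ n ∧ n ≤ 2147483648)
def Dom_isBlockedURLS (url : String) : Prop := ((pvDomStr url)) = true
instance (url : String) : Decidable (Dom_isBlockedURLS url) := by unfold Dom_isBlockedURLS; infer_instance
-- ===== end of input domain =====

-- B replaces the per-pattern 'in' scans by one left-to-right pass over URL positions
-- checking whether any blocked pattern starts there (alternative algorithm, same cost class).

-- ===== PORT A =====
-- 'for part in lst: if part in url: return True' — early-return loop over the pattern list
def pvLoopA (pats : List String) (url : String) : Bool :=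
  match pats with
  | [] => false
  | p :: rest => if PySem.Str.isIn p url then true else pvLoopA rest url

def isBlockedURLS (url : String) : Bool :=
  let blocked_parts := ["strava.app.link", "booked", "nochi", "hotelmix", "javascript:"]
  let blocked_ends := [".htm", ".onion", ".pdf"]
  if pvLoopA blocked_parts url then true
  else if pvLoopA blocked_ends url then true
  else false

-- ===== PORT B =====
-- outer loop 'for i in range(len(url)+1)' = walk down the suffixes of the URL;
-- inner loop 'url.startswith(p, i)' = does some pattern start at this position
def pvScanB (pats : List (List Char)) (s : List Char) : Bool :=
  match s with
  | [] => pats.any (fun p => PySem.Chars.startswith [] p)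
  | _ :: t => pats.any (fun p => PySem.Chars.startswith s p) || pvScanB pats t

def isBlockedURLS_alt (url : String) : Bool :=
  let patterns := ["strava.app.link", "booked", "nochi", "hotelmix", "javascript:",
                   ".htm", ".onion", ".pdf"]
  pvScanB (patterns.map String.toList) url.toList

-- ===== PRECONDITION & SPEC =====
def Spec_isBlockedURLS (url : String) (out : Bool) : Prop := out = isBlockedURLS_alt url
instance (url : String) (out : Bool) : Decidable (Spec_isBlockedURLS url out) := by unfold Spec_isBlockedURLS; infer_instance

-- ===== CLAIM (what is proved, stated in full; the proofs are below) =====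
def Claim_equal_isBlockedURLS : Prop := ∀ (url : String), Dom_isBlockedURLS url → Spec_isBlockedURLS url (isBlockedURLS url)

-- ===== LEMMAS AND PROOFS =====

theorem pv_any_congr {α : Type} (l : List α) (f g : α → Bool)
    (h : ∀ a ∈ l, f a = g a) : l.any f = l.any g := by
  induction l with
  | nil => rfl
  | cons a t ih =>
    simp only [List.any_cons, h a (by simp), ih (fun x hx => h x (by simp [hx]))]

theorem pv_any_or {α : Type} (l : List α) (f g : α → Bool) :
    l.any (fun a => f a || g a) = (l.any f || l.any g) := by
  induction l with
  | nil => rfl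
  | cons a t ih => simp only [List.any_cons, ih]; cases f a <;> cases g a <;> simp

-- one step of B's scan: pattern occurs in c::t iff it starts there or occurs in t
theorem pv_isIn_cons (p : List Char) (c : Char) (t : List Char) :
    PySem.Chars.isIn p (c :: t)
      = (PySem.Chars.startswith (c :: t) p || PySem.Chars.isIn p t) := by
  rcases h : PySem.Chars.startswith (c :: t) p with _ | _
  · rcases h' : PySem.Chars.isIn p t with _ | _
    · simp only [Bool.or_false]
      rw [PySem.Chars.isIn_eq_false_iff] at h' ⊢
      intro hinf
      rcases (List.infix_cons_iff).1 hinf with hp | hs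
      · exact absurd ((PySem.Chars.startswith_iff _ _).2 hp) (by simp [h])
      · exact h' hs
    · simp only [Bool.or_true]
      rw [PySem.Chars.isIn_iff_infix] at h' ⊢
      exact h'.trans ((List.suffix_cons c t).isInfix)
  · simp only [Bool.true_or]
    rw [PySem.Chars.isIn_iff_infix]
    exact ((PySem.Chars.startswith_iff _ _).1 h).isInfix

theorem pv_isIn_nil (p : List Char) :
    PySem.Chars.isIn p [] = PySem.Chars.startswith [] p := by
  rcases h : PySem.Chars.startswith [] p with _ | _
  · rw [PySem.Chars.isIn_eq_false_iff]
    intro hinf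
    have hnil : p = [] := List.eq_nil_of_infix_nil hinf
    have : p <+: ([] : List Char) := by simp [hnil]
    exact absurd ((PySem.Chars.startswith_iff _ _).2 this) (by simp [h])
  · rw [PySem.Chars.isIn_iff_infix]
    exact ((PySem.Chars.startswith_iff _ _).1 h).isInfix

theorem pvScanB_eq (pats : List (List Char)) (s : List Char) :
    pvScanB pats s = pats.any (fun p => PySem.Chars.isIn p s) := by
  induction s with
  | nil =>
    simp only [pvScanB]
    exact (pv_any_congr _ _ _ (fun p _ => (pv_isIn_nil p).symm)).symm ▸ rfl
  | cons c t ih =>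
    simp only [pvScanB, ih]
    rw [← pv_any_or]
    exact pv_any_congr _ _ _ (fun p _ => (pv_isIn_cons p c t).symm)

theorem pvLoopA_eq (pats : List String) (url : String) :
    pvLoopA pats url = pats.any (fun p => PySem.Str.isIn p url) := by
  induction pats with
  | nil => rfl
  | cons p rest ih =>
    simp only [pvLoopA, List.any_cons, ih]
    cases PySem.Str.isIn p url <;> simp

-- ===== VERDICT (by name: the statement is the Claim_ definition above) =====
theorem isBlockedURLS_spec : Claim_equal_isBlockedURLS := by
  intro url _
  unfold Spec_isBlockedURLS isBlockedURLS isBlockedURLS_alt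
  simp only []
  rw [pvScanB_eq, pvLoopA_eq, pvLoopA_eq]
  simp only [List.map, List.any_cons, List.any_nil, PySem.Str.isIn_eq]
  cases h1 : PySem.Chars.isIn "strava.app.link".toList url.toList <;>
  cases h2 : PySem.Chars.isIn "booked".toList url.toList <;>
  simp_all [Bool.or_assoc]
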